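-- pv_equiv track=rewrite | github.com/Ben-Edwards44/Advent-Of-Code | 2023/day14.py | back_roll
-- ===== SOURCE A (Python) =====
-- def back_roll(col):
--     prev_cube = 0
--     num_round = 0
--
--     round_pos = []
--     new_col = [None for _ in col]
--
--     for r_inx, i in enumerate(reversed(col)):
--         act_inx = len(col) - r_inx - 1
--
--         if i == "#":
--             prev_cube = r_inx + 1
--             num_round = 0
--             new_col[act_inx] = i
--         elif i == "O":
--             pos_from_end = prev_cube + num_round
--             round_pos.append(pos_from_end)
--             num_round += 1
--             new_col[act_inx] = "."
--         else:
--             new_col[act_inx] = i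
--
--     for pos_from_end in round_pos:
--         act_inx = len(new_col) - pos_from_end - 1
--         new_col[act_inx] = "O"
--
--     return new_col
-- ===== SOURCE B (Python) =====
-- def back_roll(col):
--     out = []
--     seg = []
--
--     def flush():
--         k = sum(1 for c in seg if c == "O")
--         m = len(seg)
--         for j, c in enumerate(seg):
--             if j >= m - k:
--                 out.append("O")
--             elif c == "O":
--                 out.append(".")
--             else:
--                 out.append(c)
--         seg.clear()
--
--     for c in col:
--         if c == "#":
--             flush()
--             out.append("#")
--         else:
--             seg.append(c)
--
--     flush()
--     return out
-- ===== Notes on version B (the rewrite author's own statement) =====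
-- stated objective: simpler
-- what changed: A scans the column in reverse with an explicit index/counter state and a second positional fill pass; B makes one forward pass buffering each '#'-free segment and emits it in place with its trailing count('O') cells set to 'O'.
import Mathlib
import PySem

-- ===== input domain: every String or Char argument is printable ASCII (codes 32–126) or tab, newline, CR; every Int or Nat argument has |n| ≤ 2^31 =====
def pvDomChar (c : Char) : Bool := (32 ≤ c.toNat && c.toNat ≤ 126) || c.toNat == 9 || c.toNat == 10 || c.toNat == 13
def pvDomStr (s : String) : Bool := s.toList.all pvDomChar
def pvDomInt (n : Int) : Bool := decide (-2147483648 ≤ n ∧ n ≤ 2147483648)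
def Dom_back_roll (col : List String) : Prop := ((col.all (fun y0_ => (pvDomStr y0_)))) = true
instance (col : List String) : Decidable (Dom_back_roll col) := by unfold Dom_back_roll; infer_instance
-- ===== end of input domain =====

-- B replaces A's reverse scan (index/counter state plus a second positional fill pass) by one
-- forward pass that buffers each '#'-free segment and emits it with its last count('O') cells
-- set to 'O' — simpler decomposition, same return value (neither mutates its argument's caller
-- view: A builds a fresh list, B builds a fresh list).

-- ===== PORT A =====
-- first loop of A: iterates over reversed col carrying r_inx explicitly; new_col starts as
-- Python's [None]*len(col) — every cell is assigned in this loop, so the placeholder "" that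
-- models None is never observable in the result.
def aLoop (n r_inx prev_cube num_round : Nat) (round_pos : List Nat) (new_col : List String) :
    List String → (List Nat × List String)
  | [] => (round_pos, new_col)
  | i :: rest =>
    let act_inx := n - r_inx - 1
    if i = "#" then
      aLoop n (r_inx + 1) (r_inx + 1) 0 round_pos (new_col.set act_inx i) rest
    else if i = "O" then
      aLoop n (r_inx + 1) prev_cube (num_round + 1)
        (round_pos ++ [prev_cube + num_round]) (new_col.set act_inx ".") rest
    else
      aLoop n (r_inx + 1) prev_cube num_round round_pos (new_col.set act_inx i) rest

def back_roll (col : List String) : List String :=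
  let n := col.length
  let res := aLoop n 0 0 0 [] (col.map fun _ => "") col.reverse
  res.1.foldl (fun nc pos => nc.set (nc.length - pos - 1) "O") res.2

-- ===== PORT B =====
-- flush(): emits the buffered segment; the last k cells become "O", a former "O" elsewhere
-- becomes ".", any other cell keeps its character.
def flushSeg (seg : List String) : List String :=
  let k := seg.count "O"
  let m := seg.length
  (PySem.List.enumerate seg).map (fun jc =>
    if (m : Int) - (k : Int) ≤ jc.1 then "O" else if jc.2 = "O" then "." else jc.2)

def brStep (st : List String × List String) (c : String) : List String × List String :=
  if c = "#" then (st.1 ++ flushSeg st.2 ++ ["#"], ([] : List String))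
  else (st.1, st.2 ++ [c])

def back_roll_alt (col : List String) : List String :=
  let r := col.foldl brStep ([], [])
  r.1 ++ flushSeg r.2

-- ===== PRECONDITION & SPEC =====
def Spec_back_roll (col : List String) (out : List String) : Prop := out = back_roll_alt col
instance (col : List String) (out : List String) : Decidable (Spec_back_roll col out) := by unfold Spec_back_roll; infer_instance

-- ===== CLAIM (what is proved, stated in full; the proofs are below) =====
def Claim_equal_back_roll : Prop := ∀ (col : List String), Dom_back_roll col → Spec_back_roll col (back_roll col)

-- ===== LEMMAS AND PROOFS =====

-- the per-cell map both programs apply outside the packed tail of a segment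
def mapChar (c : String) : String := if c = "O" then "." else c

-- positions-from-end collected by A's first loop
def posList (r p q : Nat) : List String → List Nat
  | [] => []
  | i :: t =>
    if i = "#" then posList (r + 1) (r + 1) 0 t
    else if i = "O" then (p + q) :: posList (r + 1) p (q + 1) t
    else posList (r + 1) p q t

-- A's second loop as a function
def fill (nc : List String) (ps : List Nat) : List String :=
  ps.foldl (fun nc pos => nc.set (nc.length - pos - 1) "O") nc

-- B's fold with an explicit starting segment
def runB (seg l : List String) : List String :=
  (l.foldl brStep ([], seg)).1 ++ flushSeg ((l.foldl brStep ([], seg)).2)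

lemma aLoop_fst (l : List String) : ∀ (n r p q : Nat) (rp : List Nat) (nc : List String),
    (aLoop n r p q rp nc l).1 = rp ++ posList r p q l := by
  induction l with
  | nil => intro n r p q rp nc; simp [aLoop, posList]
  | cons i t ih =>
    intro n r p q rp nc
    by_cases h1 : i = "#"
    · simp [aLoop, posList, h1, ih]
    · by_cases h2 : i = "O"
      · simp [aLoop, posList, h1, h2, ih]
      · simp [aLoop, posList, h1, h2, ih]

lemma aLoop_snd (l : List String) : ∀ (n r p q : Nat) (rp : List Nat) (nc : List String),
    nc.length = n → r + l.length ≤ n →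
    (aLoop n r p q rp nc l).2
      = nc.take (n - r - l.length) ++ (l.map mapChar).reverse ++ nc.drop (n - r) := by
  induction l with
  | nil =>
    intro n r p q rp nc hlen hle
    simp [aLoop]
  | cons i t ih =>
    intro n r p q rp nc hlen hle
    have hr : r + 1 + t.length ≤ n := by simp at hle; omega
    have hidx : n - r - 1 < nc.length := by omega
    have hset : ∀ (p' q' : Nat) (rp' : List Nat),
        (aLoop n (r + 1) p' q' rp' (nc.set (n - r - 1) (mapChar i)) t).2
          = nc.take (n - r - (t.length + 1)) ++ ((i :: t).map mapChar).reverse ++ nc.drop (n - r) := by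
      intro p' q' rp'
      rw [ih n (r + 1) p' q' rp' _ (by simp [hlen]) hr]
      have h1 : (nc.set (n - r - 1) (mapChar i)).take (n - (r + 1) - t.length)
          = nc.take (n - r - (t.length + 1)) := by
        rw [List.take_set_of_le (by omega)]
        congr 1; omega
      have h2 : (nc.set (n - r - 1) (mapChar i)).drop (n - (r + 1))
          = mapChar i :: nc.drop (n - r) := by
        have hn1 : n - (r + 1) = n - r - 1 := by omega
        have hlt : (nc.take (n - r - 1)).length = n - r - 1 := by
          rw [List.length_take]; omega
        calc (nc.set (n - r - 1) (mapChar i)).drop (n - (r + 1))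
            = (nc.take (n - r - 1) ++ mapChar i :: nc.drop (n - r - 1 + 1)).drop
                ((nc.take (n - r - 1)).length) := by
              rw [List.set_eq_take_append_cons_drop, if_pos hidx, hn1, hlt]
          _ = mapChar i :: nc.drop (n - r - 1 + 1) := List.drop_left
          _ = mapChar i :: nc.drop (n - r) := by
              rw [show n - r - 1 + 1 = n - r from by omega]
      rw [h1, h2]
      simp [List.reverse_cons, List.append_assoc]
    by_cases h1 : i = "#"
    · have : mapChar i = i := by rw [h1]; rfl
      simp only [aLoop, h1, if_pos rfl]
      rw [← h1] at *
      rw [show (nc.set (n - r - 1) i) = (nc.set (n - r - 1) (mapChar i)) by rw [this]]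
      simpa using hset (r + 1) 0 rp
    · by_cases h2 : i = "O"
      · subst h2
        simp only [aLoop, if_neg h1, if_pos rfl]
        rw [show (nc.set (n - r - 1) ".") = (nc.set (n - r - 1) (mapChar "O")) from rfl]
        simpa using hset p (q + 1) (rp ++ [p + q])
      · have : mapChar i = i := by simp [mapChar, h2]
        simp only [aLoop, if_neg h1, if_neg h2]
        rw [show (nc.set (n - r - 1) i) = (nc.set (n - r - 1) (mapChar i)) by rw [this]]
        simpa using hset p q rp

lemma back_roll_eq (col : List String) :
    back_roll col = fill (col.map mapChar) (posList 0 0 0 col.reverse) := by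
  have hlen : (col.map (fun _ => "")).length = col.length := by simp
  have hrl : col.reverse.length = col.length := by simp
  simp only [back_roll]
  rw [aLoop_fst, aLoop_snd col.reverse col.length 0 0 0 [] _ hlen (by omega)]
  simp [fill, hrl]

lemma posList_lt (l : List String) : ∀ (r p q : Nat), p + q ≤ r →
    ∀ x ∈ posList r p q l, x < r + l.length := by
  induction l with
  | nil => intro r p q _ x hx; simp [posList] at hx
  | cons i t ih =>
    intro r p q hpq x hx
    by_cases h1 : i = "#"
    · simp only [posList, if_pos h1] at hx
      have := ih (r + 1) (r + 1) 0 (by omega) x hx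
      simp; omega
    · by_cases h2 : i = "O"
      · simp only [posList, if_neg h1, if_pos h2, List.mem_cons] at hx
        rcases hx with hx | hx
        · simp; omega
        · have := ih (r + 1) p (q + 1) (by omega) x hx
          simp; omega
      · simp only [posList, if_neg h1, if_neg h2] at hx
        have := ih (r + 1) p q (by omega) x hx
        simp; omega

lemma posList_no_hash (l : List String) (h : "#" ∉ l) : ∀ (r p q : Nat) (rest : List String),
    posList r p q (l ++ rest)
      = (List.range (l.count "O")).map (fun j => p + q + j)
          ++ posList (r + l.length) p (q + l.count "O") rest := by
  induction l with
  | nil => intro r p q rest; simp [posList]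
  | cons i t ih =>
    intro r p q rest
    have h1 : i ≠ "#" := fun hh => h (by simp [hh])
    have ht : "#" ∉ t := fun hh => h (by simp [hh])
    by_cases h2 : i = "O"
    · have hcnt : (i :: t).count "O" = t.count "O" + 1 := by
        rw [h2]; simp
      have hstep : posList r p q ((i :: t) ++ rest)
          = (p + q) :: posList (r + 1) p (q + 1) (t ++ rest) := by
        simp only [List.cons_append, posList, if_neg h1, if_pos h2]
      rw [hstep, ih ht, hcnt, List.length_cons, List.range_succ_eq_map, List.map_cons,
        List.map_map]
      have h3 : List.map (fun j => p + (q + 1) + j) (List.range (t.count "O"))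
          = List.map ((fun j => p + q + j) ∘ Nat.succ) (List.range (t.count "O")) :=
        List.map_congr_left (fun a _ => by simp [Function.comp, Nat.succ_eq_add_one]; omega)
      have h4 : r + 1 + t.length = r + (t.length + 1) := by omega
      have h5 : q + 1 + t.count "O" = q + (t.count "O" + 1) := by omega
      rw [h3, h4, h5]
      simp
    · have hcnt : (i :: t).count "O" = t.count "O" := by
        simp [List.count_cons, h2]
      have hstep : posList r p q ((i :: t) ++ rest) = posList (r + 1) p q (t ++ rest) := by
        simp only [List.cons_append, posList, if_neg h1, if_neg h2]
      rw [hstep, ih ht, hcnt, List.length_cons,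
        show r + 1 + t.length = r + (t.length + 1) from by omega]

lemma posList_shift (l : List String) : ∀ (r p q s : Nat),
    posList (r + s) (p + s) q l = (posList r p q l).map (· + s) := by
  induction l with
  | nil => intro r p q s; simp [posList]
  | cons i t ih =>
    intro r p q s
    by_cases h1 : i = "#"
    · simp only [posList, if_pos h1]
      rw [show r + s + 1 = (r + 1) + s by omega, ih]
    · by_cases h2 : i = "O"
      · simp only [posList, if_neg h1, if_pos h2, List.map_cons]
        rw [show r + s + 1 = (r + 1) + s by omega, ih]
        congr 1
        omega
      · simp only [posList, if_neg h1, if_neg h2]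
        rw [show r + s + 1 = (r + 1) + s by omega, ih]

lemma fill_nil (nc : List String) : fill nc [] = nc := rfl

lemma fill_cons (nc : List String) (p : Nat) (ps : List Nat) :
    fill nc (p :: ps) = fill (nc.set (nc.length - p - 1) "O") ps := rfl

lemma fill_append (nc : List String) (ps qs : List Nat) :
    fill nc (ps ++ qs) = fill (fill nc ps) qs := List.foldl_append

lemma fill_inner (ps : List Nat) : ∀ (u v : List String), (∀ p ∈ ps, p < v.length) →
    fill (u ++ v) ps = u ++ fill v ps := by
  induction ps with
  | nil => intro u v _; rfl
  | cons p ps ih =>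
    intro u v hp
    have hpv : p < v.length := hp p (by simp)
    rw [fill_cons, fill_cons]
    have hidx : (u ++ v).length - p - 1 = u.length + (v.length - p - 1) := by
      simp; omega
    rw [hidx, List.set_append_right _ _ (by omega)]
    have : u.length + (v.length - p - 1) - u.length = v.length - p - 1 := by omega
    rw [this, ih u _ (fun x hx => by rw [List.length_set]; exact hp x (by simp [hx]))]

lemma fill_shift (ps : List Nat) : ∀ (u v : List String), (∀ p ∈ ps, p < u.length) →
    fill (u ++ v) (ps.map (· + v.length)) = fill u ps ++ v := by
  induction ps with
  | nil => intro u v _; rfl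
  | cons p ps ih =>
    intro u v hp
    have hpu : p < u.length := hp p (by simp)
    simp only [List.map_cons]
    rw [fill_cons, fill_cons]
    have hidx : (u ++ v).length - (p + v.length) - 1 = u.length - p - 1 := by
      simp; omega
    rw [hidx, List.set_append_left _ _ (by omega)]
    rw [ih _ v (fun x hx => by rw [List.length_set]; exact hp x (by simp [hx]))]

lemma fill_range : ∀ (k : Nat) (w : List String), k ≤ w.length →
    fill w (List.range k) = w.take (w.length - k) ++ List.replicate k "O" := by
  intro k
  induction k with
  | zero => intro w _; simp [fill]
  | succ k ih =>
    intro w hk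
    rw [List.range_succ, fill_append, ih w (by omega)]
    rw [fill_cons, fill_nil]
    have hm : w.length - (k + 1) < w.length := by omega
    have htk : (w.take (w.length - (k + 1))).length = w.length - (k + 1) := by
      rw [List.length_take]; omega
    have hlen : (w.take (w.length - k) ++ List.replicate k "O").length = w.length := by
      simp [List.length_take]; omega
    have hsplit : w.take (w.length - k)
        = w.take (w.length - (k + 1)) ++ [w[w.length - (k + 1)]] := by
      rw [show w.length - k = (w.length - (k + 1)) + 1 from by omega, List.take_succ,
        List.getElem?_eq_getElem hm]
      simp
    rw [hlen, hsplit, List.append_assoc, List.set_append_right _ _ (by rw [htk]; omega), htk]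
    rw [show w.length - k - 1 - (w.length - (k + 1)) = 0 from by omega]
    simp [List.replicate_succ]

lemma flushSeg_length (seg : List String) : (flushSeg seg).length = seg.length := by
  simp [flushSeg, PySem.List.length_enumerate]

lemma flushSeg_eq (seg : List String) :
    flushSeg seg = (seg.map mapChar).take (seg.length - seg.count "O")
      ++ List.replicate (seg.count "O") "O" := by
  have hk : seg.count "O" ≤ seg.length := List.count_le_length
  apply List.ext_getElem
  · rw [flushSeg_length]
    simp [List.length_take]
    omega
  · intro i hi hi'
    rw [flushSeg_length] at hi
    simp only [flushSeg, List.getElem_map, PySem.List.getElem_enumerate]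
    by_cases hc : i < seg.length - seg.count "O"
    · rw [List.getElem_append_left (by simp [List.length_take]; omega)]
      rw [List.getElem_take, List.getElem_map]
      have : ¬ ((seg.length : Int) - (seg.count "O" : Int) ≤ 0 + (i : Int)) := by
        push_cast; omega
      rw [if_neg this]
      simp [mapChar]
    · rw [List.getElem_append_right (by simp [List.length_take]; omega)]
      rw [List.getElem_replicate]
      have : (seg.length : Int) - (seg.count "O" : Int) ≤ 0 + (i : Int) := by
        push_cast; omega
      rw [if_pos this]

lemma foldl_brStep_out (l : List String) : ∀ (out seg : List String),
    l.foldl brStep (out, seg)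
      = (out ++ (l.foldl brStep ([], seg)).1, (l.foldl brStep ([], seg)).2) := by
  induction l with
  | nil => intro out seg; simp
  | cons c t ih =>
    intro out seg
    by_cases hc : c = "#"
    · have hb : ∀ (o s : List String), brStep (o, s) c = (o ++ flushSeg s ++ ["#"], ([] : List String)) := by
        intro o s; simp [brStep, hc]
      rw [List.foldl_cons, List.foldl_cons, hb, hb, ih (out ++ flushSeg seg ++ ["#"]) [],
        ih (([] : List String) ++ flushSeg seg ++ ["#"]) []]
      simp [List.append_assoc]
    · have hb : ∀ (o s : List String), brStep (o, s) c = (o, s ++ [c]) := by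
        intro o s; simp [brStep, hc]
      rw [List.foldl_cons, List.foldl_cons, hb, hb, ih out (seg ++ [c]), ih [] (seg ++ [c])]

lemma runB_no_hash : ∀ (l : List String), "#" ∉ l → ∀ (seg : List String),
    runB seg l = flushSeg (seg ++ l) := by
  intro l
  induction l with
  | nil => intro _ seg; simp [runB]
  | cons c t ih =>
    intro h seg
    have hc : c ≠ "#" := fun hh => h (by simp [hh])
    have ht : "#" ∉ t := fun hh => h (by simp [hh])
    have : runB seg (c :: t) = runB (seg ++ [c]) t := by
      simp [runB, brStep, hc]
    rw [this, ih ht (seg ++ [c])]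
    simp

lemma runB_split (l ys : List String) (h : "#" ∉ ys) (seg : List String) :
    runB seg (l ++ "#" :: ys) = runB seg l ++ "#" :: flushSeg ys := by
  have h1 : (l ++ "#" :: ys).foldl brStep (([] : List String), seg)
      = ((l.foldl brStep ([], seg)).1 ++ flushSeg (l.foldl brStep ([], seg)).2 ++ ["#"]
          ++ (ys.foldl brStep (([] : List String), ([] : List String))).1,
         (ys.foldl brStep (([] : List String), ([] : List String))).2) := by
    rw [List.foldl_append]
    have : brStep (l.foldl brStep ([], seg)) "#"
        = ((l.foldl brStep ([], seg)).1 ++ flushSeg (l.foldl brStep ([], seg)).2 ++ ["#"],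
           ([] : List String)) := by
      simp [brStep]
    rw [List.foldl_cons, this, foldl_brStep_out]
  have h2 : runB ([] : List String) ys = flushSeg ys := by
    rw [runB_no_hash ys h []]; simp
  simp only [runB, h1]
  simp only [runB] at h2
  simp [List.append_assoc, h2]

lemma alt_eq_runB (col : List String) : back_roll_alt col = runB [] col := rfl

lemma exists_first_split (a : String) : ∀ (l : List String), a ∈ l →
    ∃ s t, l = s ++ a :: t ∧ a ∉ s := by
  intro l
  induction l with
  | nil => intro h; simp at h
  | cons b t ih =>
    intro h
    by_cases hb : b = a
    · exact ⟨[], t, by simp [hb], by simp⟩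
    · have ha : a ∈ t := by
        rcases List.mem_cons.mp h with h' | h'
        · exact absurd h'.symm hb
        · exact h'
      obtain ⟨s, t', hst, hns⟩ := ih ha
      exact ⟨b :: s, t', by simp [hst], by
        simp [List.mem_cons, hns]
        intro hh; exact hb hh.symm⟩

lemma exists_last_split (col : List String) (h : "#" ∈ col) :
    ∃ xs ys, col = xs ++ "#" :: ys ∧ "#" ∉ ys := by
  have hrev : "#" ∈ col.reverse := by simpa using h
  obtain ⟨s, t, hst, hns⟩ := exists_first_split "#" col.reverse hrev
  refine ⟨t.reverse, s.reverse, ?_, by simpa using hns⟩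
  have : col.reverse.reverse = (s ++ "#" :: t).reverse := by rw [hst]
  simpa [List.reverse_append] using this

lemma main_equiv : ∀ (n : Nat) (col : List String), col.length ≤ n →
    back_roll col = runB [] col := by
  intro n
  induction n with
  | zero =>
    intro col h
    have : col = [] := List.eq_nil_of_length_eq_zero (by omega)
    subst this; rfl
  | succ n ih =>
    intro col hlen
    by_cases hmem : "#" ∈ col
    · obtain ⟨xs, ys, hcol, hys⟩ := exists_last_split col hmem
      subst hcol
      have hxs : xs.length ≤ n := by simp at hlen; omega
      have hysr : "#" ∉ ys.reverse := by simpa using hys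
      have hk : ys.count "O" ≤ ys.length := List.count_le_length
      rw [back_roll_eq]
      have hrev : (xs ++ "#" :: ys).reverse = ys.reverse ++ "#" :: xs.reverse := by
        simp [List.reverse_append]
      rw [hrev]
      rw [posList_no_hash ys.reverse hysr 0 0 0 ("#" :: xs.reverse)]
      have hcr : ys.reverse.count "O" = ys.count "O" := List.count_reverse
      have hp1 : (List.range (ys.reverse.count "O")).map (fun j => 0 + 0 + j)
          = List.range (ys.count "O") := by
        rw [hcr]
        exact (List.map_congr_left (fun a _ => by simp)).trans (List.map_id _)
      have hp2 : posList (0 + ys.reverse.length) 0 (0 + ys.reverse.count "O") ("#" :: xs.reverse)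
          = (posList 0 0 0 xs.reverse).map (· + (ys.length + 1)) := by
        simp only [posList, if_pos rfl]
        have : ys.reverse.length + 1 = 0 + (ys.length + 1) := by simp
        rw [show (0 + ys.reverse.length + 1) = 0 + (ys.length + 1) by simp]
        rw [show (0 + (ys.length + 1)) = 0 + (ys.length + 1) from rfl]
        exact posList_shift xs.reverse 0 0 0 (ys.length + 1)
      rw [hp1, hp2]
      have hmap : (xs ++ "#" :: ys).map mapChar
          = (xs.map mapChar ++ ["#"]) ++ ys.map mapChar := by
        have : mapChar "#" = "#" := rfl
        simp [this]
      rw [hmap, fill_append]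
      have hfin : fill ((xs.map mapChar ++ ["#"]) ++ ys.map mapChar) (List.range (ys.count "O"))
          = (xs.map mapChar ++ ["#"]) ++ fill (ys.map mapChar) (List.range (ys.count "O")) :=
        fill_inner _ _ _ (fun p hp => by
          simp at hp; simp; omega)
      rw [hfin, fill_range (ys.count "O") (ys.map mapChar) (by simp [hk])]
      have hflush : (ys.map mapChar).take ((ys.map mapChar).length - ys.count "O")
          ++ List.replicate (ys.count "O") "O" = flushSeg ys := by
        rw [flushSeg_eq]; simp
      rw [hflush]
      have hre : (xs.map mapChar ++ ["#"]) ++ flushSeg ys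
          = xs.map mapChar ++ ("#" :: flushSeg ys) := by simp
      rw [hre]
      have hlenv : ("#" :: flushSeg ys).length = ys.length + 1 := by
        simp [flushSeg_length]
      have hshift : fill (xs.map mapChar ++ ("#" :: flushSeg ys))
            ((posList 0 0 0 xs.reverse).map (· + (ys.length + 1)))
          = fill (xs.map mapChar) (posList 0 0 0 xs.reverse) ++ ("#" :: flushSeg ys) := by
        rw [← hlenv]
        exact fill_shift _ _ _ (fun p hp => by
          have := posList_lt xs.reverse 0 0 0 (by omega) p hp
          simp at this ⊢; omega)
      rw [hshift, ← back_roll_eq, ih xs hxs, runB_split xs ys hys]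
    · rw [back_roll_eq]
      have hrevnh : "#" ∉ col.reverse := by simpa using hmem
      have hk : col.count "O" ≤ col.length := List.count_le_length
      have := posList_no_hash col.reverse hrevnh 0 0 0 []
      rw [List.append_nil] at this
      rw [this]
      simp only [posList, List.append_nil]
      have hp1 : (List.range (col.reverse.count "O")).map (fun j => 0 + 0 + j)
          = List.range (col.count "O") := by
        rw [List.count_reverse]
        exact (List.map_congr_left (fun a _ => by simp)).trans (List.map_id _)
      rw [hp1, fill_range (col.count "O") (col.map mapChar) (by simp [hk])]
      rw [runB_no_hash col hmem []]
      rw [flushSeg_eq]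
      simp

-- ===== VERDICT (by name: the statement is the Claim_ definition above) =====
theorem back_roll_spec : Claim_equal_back_roll := by
  intro col _
  unfold Spec_back_roll
  rw [alt_eq_runB]
  exact main_equiv col.length col le_rfl
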